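-- pv_equiv track=rewrite | github.com/Neeraj281998/Querysense | api/services/explain.py | get_table_schema
-- ===== SOURCE A (Python) =====
-- def get_table_schema(tables: list[str], rows: list) -> str:
--     """
--     Formats table schema rows into a readable string for Claude.
--     """
--     if not rows:
--         return "No schema information available."
--
--     schema_lines = []
--     current_table = None
--
--     for row in rows:
--         table_name = row["table_name"]
--         if table_name != current_table:
--             current_table = table_name
--             schema_lines.append(f"\nTable: {table_name}")
--             schema_lines.append("-" * 40)
--
--         nullable = "NULL" if row["is_nullable"] == "YES" else "NOT NULL"
--         default = f" DEFAULT {row['column_default']}" if row["column_default"] else ""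
--         schema_lines.append(f"  {row['column_name']:25} {row['data_type']:20} {nullable}{default}")
--
--     return "\n".join(schema_lines)
-- ===== SOURCE B (Python) =====
-- def _column_line(row):
--     nullable = "NULL" if row["is_nullable"] == "YES" else "NOT NULL"
--     default = f" DEFAULT {row['column_default']}" if row["column_default"] else ""
--     return f"  {row['column_name']:25} {row['data_type']:20} {nullable}{default}"
--
--
-- def _blocks(rows):
--     # recursive run-splitting: peel off the leading run of rows that share
--     # the first row's table_name, emit its block, recurse on the remainder
--     if not rows:
--         return []
--     name = rows[0]["table_name"]
--     k = 0
--     while k < len(rows) and rows[k]["table_name"] == name: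
--         k += 1
--     lines = ["\nTable: " + name, "-" * 40]
--     for row in rows[:k]:
--         lines.append(_column_line(row))
--     return lines + _blocks(rows[k:])
--
--
-- def get_table_schema(tables: list[str], rows: list) -> str:
--     if not rows:
--         return "No schema information available."
--     return "\n".join(_blocks(rows))
-- ===== Notes on version B (the rewrite author's own statement) =====
-- stated objective: alternative
-- what changed: A is a single stateful pass tracking the previously seen table name; B recursively splits the row list into maximal runs of equal table_name and formats each run as a self-contained block.
import Mathlib
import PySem

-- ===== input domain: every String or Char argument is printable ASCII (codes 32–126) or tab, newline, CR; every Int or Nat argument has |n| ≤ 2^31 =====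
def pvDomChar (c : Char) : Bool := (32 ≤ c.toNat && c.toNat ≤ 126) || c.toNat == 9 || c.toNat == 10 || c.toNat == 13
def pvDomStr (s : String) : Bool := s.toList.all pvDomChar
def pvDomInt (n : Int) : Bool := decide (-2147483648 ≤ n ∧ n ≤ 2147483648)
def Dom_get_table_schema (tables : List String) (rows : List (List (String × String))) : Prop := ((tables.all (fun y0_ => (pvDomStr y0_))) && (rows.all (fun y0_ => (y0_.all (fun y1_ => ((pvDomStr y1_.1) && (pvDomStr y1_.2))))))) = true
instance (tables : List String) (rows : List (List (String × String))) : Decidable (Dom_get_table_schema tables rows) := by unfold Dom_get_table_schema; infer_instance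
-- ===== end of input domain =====

-- B replaces A's single stateful pass (tracking the last table name) with a recursive
-- split of the row list into maximal runs of equal table_name, one block per run.

-- ===== PORT A =====
-- shared helpers: both Pythons contain the identical dict lookups and line formatting
-- row["k"]: dict lookup = first match in the association list; Pre_ guarantees the key
-- is present, so the .getD "" default is never the value Python would raise on.
def dget (row : List (String × String)) (k : String) : String :=
  (List.lookup k row).getD ""

-- "-" * 40
def dashes : String := String.ofList (List.replicate 40 '-')

-- f"{s:w}" : left-justify with spaces to width w (unchanged when already that long)
def pad (s : String) (w : Nat) : String :=
  s ++ String.ofList (List.replicate (w - (PySem.Str.len s).toNat) ' ')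

-- the formatted column line (A's loop body after the header check = B's _column_line)
def lineFor (row : List (String × String)) : String :=
  let nullable := if dget row "is_nullable" == "YES" then "NULL" else "NOT NULL"
  let default := if dget row "column_default" != "" then " DEFAULT " ++ dget row "column_default" else ""
  "  " ++ pad (dget row "column_name") 25 ++ " " ++ pad (dget row "data_type") 20 ++ " " ++ nullable ++ default

-- one iteration of A's for-loop over state (schema_lines, current_table)
def stepA (st : List String × Option String) (row : List (String × String)) :
    List String × Option String :=
  let table_name := dget row "table_name"
  let st' := if st.2 ≠ some table_name
             then (st.1 ++ ["\nTable: " ++ table_name, dashes], some table_name)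
             else st
  (st'.1 ++ [lineFor row], st'.2)

def get_table_schema (tables : List String) (rows : List (List (String × String))) : String :=
  if rows.isEmpty then "No schema information available."
  else PySem.Str.join "\n" (rows.foldl stepA ([], none)).1

-- ===== PORT B =====
-- _blocks; the while-scan computing k and the slices rows[:k]/rows[k:] are exactly
-- takeWhile/dropWhile on "same table_name as the first row"
def blocksB : List (List (String × String)) → List String
  | [] => []
  | r :: rs =>
    let name := dget r "table_name"
    let run := (r :: rs).takeWhile (fun row => dget row "table_name" == name)
    let rest := (r :: rs).dropWhile (fun row => dget row "table_name" == name)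
    ("\nTable: " ++ name) :: dashes :: (run.map lineFor ++ blocksB rest)
termination_by rows => rows.length
decreasing_by
  simp only [List.dropWhile_cons, beq_self_eq_true, if_true]
  exact Nat.lt_succ_of_le (List.length_dropWhile_le _ _)

def get_table_schema_alt (tables : List String) (rows : List (List (String × String))) : String :=
  if rows.isEmpty then "No schema information available."
  else PySem.Str.join "\n" (blocksB rows)

-- ===== PRECONDITION & SPEC =====
-- Pre_ excludes exactly the inputs where A raises KeyError: a row missing one of the
-- five keys A reads.
def Pre_get_table_schema (tables : List String) (rows : List (List (String × String))) : Prop :=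
  (rows.all (fun row =>
    ["table_name", "is_nullable", "column_default", "column_name", "data_type"].all
      (fun k => row.any (fun p => p.1 == k)))) = true

instance (tables : List String) (rows : List (List (String × String))) : Decidable (Pre_get_table_schema tables rows) := by unfold Pre_get_table_schema; infer_instance

def pvWitness_get_table_schema : List String × (List (List (String × String))) :=
  (["t"], [[("table_name", "t"), ("is_nullable", "YES"), ("column_default", ""),
            ("column_name", "id"), ("data_type", "int")]])

def Spec_get_table_schema (tables : List String) (rows : List (List (String × String))) (out : String) : Prop := out = get_table_schema_alt tables rows
instance (tables : List String) (rows : List (List (String × String))) (out : String) : Decidable (Spec_get_table_schema tables rows out) := by unfold Spec_get_table_schema; infer_instance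

-- ===== CLAIM (what is proved, stated in full; the proofs are below) =====
def Claim_equal_get_table_schema : Prop := ∀ (tables : List String) (rows : List (List (String × String))), Dom_get_table_schema tables rows → Pre_get_table_schema tables rows → Spec_get_table_schema tables rows (get_table_schema tables rows)

-- ===== LEMMAS AND PROOFS =====

-- B's block recursion unfolded on a cons cell
theorem blocksB_cons (r : List (String × String)) (rs : List (List (String × String))) :
    blocksB (r :: rs)
      = ("\nTable: " ++ dget r "table_name") :: dashes ::
          ((r :: (rs.takeWhile (fun row => dget row "table_name" == dget r "table_name"))).map lineFor
            ++ blocksB (rs.dropWhile (fun row => dget row "table_name" == dget r "table_name"))) := by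
  conv_lhs => rw [blocksB]
  simp only [List.takeWhile_cons, List.dropWhile_cons, beq_self_eq_true, if_true]

-- A's fold over a run of rows whose table_name equals the current table emits only
-- column lines, leaving the state's table name unchanged
theorem foldA_run (name : String) : ∀ (rows : List (List (String × String))) (lines : List String),
    rows.foldl stepA (lines, some name)
      = (rows.dropWhile (fun r => dget r "table_name" == name)).foldl stepA
          (lines ++ (rows.takeWhile (fun r => dget r "table_name" == name)).map lineFor, some name)
  | [], lines => by simp
  | r :: rs, lines => by
    by_cases h : dget r "table_name" = name
    · have hstep : (r :: rs).foldl stepA (lines, some name) = rs.foldl stepA (lines ++ [lineFor r], some name) := by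
        simp [stepA, h]
      rw [hstep, foldA_run name rs (lines ++ [lineFor r])]
      simp [List.takeWhile_cons, List.dropWhile_cons, h]
    · simp [List.takeWhile_cons, List.dropWhile_cons, h]

-- main invariant: running A's loop on a nonempty row list whose first table name differs
-- from the current one appends exactly B's blocks to the lines accumulated so far
theorem foldA_blocks : ∀ (n : Nat) (r : List (String × String)) (rs : List (List (String × String)))
    (lines : List String) (cur : Option String), rs.length < n →
    cur ≠ some (dget r "table_name") →
    ((r :: rs).foldl stepA (lines, cur)).1 = lines ++ blocksB (r :: rs)
  | 0, _, _, _, _, h, _ => absurd h (by omega)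
  | n + 1, r, rs, lines, cur, hn, hcur => by
    have hstep : (r :: rs).foldl stepA (lines, cur)
        = rs.foldl stepA (lines ++ ["\nTable: " ++ dget r "table_name", dashes, lineFor r],
            some (dget r "table_name")) := by
      simp [stepA, hcur]
    rw [hstep, foldA_run (dget r "table_name") rs, blocksB_cons]
    cases hrest : rs.dropWhile (fun row => dget row "table_name" == dget r "table_name") with
    | nil =>
      have hb : blocksB [] = [] := by rw [blocksB]
      simp [hb]
    | cons r' rs' =>
      have hfind := List.find?_not_eq_head?_dropWhile
        (p := fun row => dget row "table_name" == dget r "table_name") (l := rs)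
      rw [hrest] at hfind
      simp only [List.head?_cons] at hfind
      have hr' : dget r' "table_name" ≠ dget r "table_name" := by
        simpa using List.find?_some hfind
      have hlen : rs'.length < n := by
        have h1 := List.length_dropWhile_le (p := fun row => dget row "table_name" == dget r "table_name") (l := rs)
        rw [hrest] at h1
        simp at h1
        omega
      rw [foldA_blocks n r' rs' _ (some (dget r "table_name")) hlen
            (by simpa using fun h => hr' h.symm)]
      simp

-- ===== VERDICT (by name: the statement is the Claim_ definition above) =====
theorem get_table_schema_spec : Claim_equal_get_table_schema := by
  intro tables rows _ _
  unfold Spec_get_table_schema get_table_schema get_table_schema_alt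
  cases rows with
  | nil => simp
  | cons r rs =>
    simp only [List.isEmpty_cons, Bool.false_eq_true, if_false]
    rw [foldA_blocks (rs.length + 1) r rs [] none (by omega) (by simp)]
    simp
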